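-- pv_equiv track=rewrite | github.com/ebayes/HarvardCS182-EthicalCreditRiskModel | Code/a_data_manipulation.py | get_attention_sequence
-- ===== SOURCE A (Python) =====
-- def get_attention_for_previous_months(payment_profile):
--     #need to change
--     for char in payment_profile:
--         # create H flag
--         if char == '5':
--             return 'HHH'
--
--     return 'MMM'
--
-- def get_attention_sequence(payment_profile):
--     MONTHS = 3
--     payment_profile = payment_profile[1]
--     overtime = MONTHS - len(payment_profile) % MONTHS
--
--     if overtime != 0:
--         for i in range(overtime):
--             payment_profile = '0' + payment_profile
--
--     atten = ''
--
--     for i in range(int(len(payment_profile) / MONTHS)):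
--         index = i * 3
--
--         previous_months = payment_profile[index:index + MONTHS]
--         attention = get_attention_for_previous_months(previous_months)
--         atten = atten + attention
--
--     for i in range(overtime):
--         atten = atten[1:]
--
--     return atten
-- ===== SOURCE B (Python) =====
-- def get_attention_sequence(payment_profile):
--     s = payment_profile[1]
--     pieces = []
--     i = len(s)
--     while i > 0:
--         chunk = s[max(0, i - 3):i]
--         pieces.append(('H' if '5' in chunk else 'M') * len(chunk))
--         i -= 3
--     return ''.join(reversed(pieces))
-- ===== Notes on version B (the rewrite author's own statement) =====
-- stated objective: simpler
-- what changed: B walks the profile string right-to-left in steps of 3, flagging each right-aligned chunk directly, instead of A's front-padding with '0' to a multiple of 3, flagging left chunks via an early-return helper, and trimming the pad's flags off afterwards.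
import Mathlib
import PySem

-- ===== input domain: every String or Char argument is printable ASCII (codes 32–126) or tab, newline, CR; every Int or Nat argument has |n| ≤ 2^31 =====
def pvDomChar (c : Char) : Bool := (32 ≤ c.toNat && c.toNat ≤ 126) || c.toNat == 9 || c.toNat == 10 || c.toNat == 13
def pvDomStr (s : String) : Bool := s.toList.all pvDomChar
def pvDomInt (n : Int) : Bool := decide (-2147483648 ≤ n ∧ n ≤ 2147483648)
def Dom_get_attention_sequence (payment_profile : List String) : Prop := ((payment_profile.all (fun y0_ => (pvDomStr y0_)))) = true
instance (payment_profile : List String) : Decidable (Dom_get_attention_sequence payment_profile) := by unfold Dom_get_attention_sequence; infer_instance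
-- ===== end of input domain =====

-- B replaces A's pad-to-multiple-of-3 / flag / trim scheme by a single right-to-left walk in
-- steps of 3 (objective: simpler — no padding and no trimming pass).

-- ===== PORT A =====
-- helper get_attention_for_previous_months: loop with early return on '5'
def pvAttFor : List Char → List Char
  | [] => ['M', 'M', 'M']
  | c :: rest => if c = '5' then ['H', 'H', 'H'] else pvAttFor rest

def get_attention_sequence (payment_profile : List String) : String :=
  match PySem.List.pyGet? payment_profile 1 with
  | none => ""          -- IndexError; excluded by Pre_
  | some pp0 =>
    let pp := pp0.toList
    -- overtime = MONTHS - len % MONTHS; both sides nonnegative, so Nat arithmetic is Python-exact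
    let overtime : Nat := 3 - pp.length % 3
    let padded := if overtime ≠ 0 then
        (PySem.List.pyRange 0 (overtime : Int) 1).foldl (fun acc _ => '0' :: acc) pp
      else pp
    -- int(len(padded)/MONTHS): padded.length is far below 2^53, so float division is exact = Nat division
    let atten := (PySem.List.pyRange 0 ((padded.length / 3 : Nat) : Int) 1).foldl
        (fun acc (i : Int) =>
          acc ++ pvAttFor (PySem.List.slice padded (some (i * 3)) (some (i * 3 + 3)))) []
    let atten := (PySem.List.pyRange 0 (overtime : Int) 1).foldl
        (fun acc _ => PySem.List.slice acc (some 1) none) atten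
    String.ofList atten

-- ===== PORT B =====
-- pieces of Source B's while-loop, in append order (from the end of s); i steps n, n-3, …
-- s[max(0,i-3):i] = (s.take i).drop (i-3)  (Nat subtraction is exactly max(0, i-3))
def pvPieces (s : List Char) (i : Nat) : List (List Char) :=
  if _h : i = 0 then []
  else
    (List.replicate ((s.take i).drop (i - 3)).length
        (if ((s.take i).drop (i - 3)).contains '5' then 'H' else 'M')) :: pvPieces s (i - 3)
termination_by i
decreasing_by omega

def get_attention_sequence_alt (payment_profile : List String) : String :=
  match PySem.List.pyGet? payment_profile 1 with
  | none => ""          -- IndexError; excluded by Pre_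
  | some s0 =>
    String.ofList ((pvPieces s0.toList s0.toList.length).reverse.flatten)

-- ===== PRECONDITION & SPEC =====
-- A (and B) evaluate payment_profile[1]: lists with fewer than two elements raise IndexError.
def Pre_get_attention_sequence (payment_profile : List String) : Prop :=
  2 ≤ payment_profile.length
instance (payment_profile : List String) : Decidable (Pre_get_attention_sequence payment_profile) := by
  unfold Pre_get_attention_sequence; infer_instance

def pvWitness_get_attention_sequence : List String := ["x", "12545"]

def Spec_get_attention_sequence (payment_profile : List String) (out : String) : Prop := out = get_attention_sequence_alt payment_profile
instance (payment_profile : List String) (out : String) : Decidable (Spec_get_attention_sequence payment_profile out) := by unfold Spec_get_attention_sequence; infer_instance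

-- ===== CLAIM (what is proved, stated in full; the proofs are below) =====
def Claim_equal_get_attention_sequence : Prop := ∀ (payment_profile : List String), Dom_get_attention_sequence payment_profile → Pre_get_attention_sequence payment_profile → Spec_get_attention_sequence payment_profile (get_attention_sequence payment_profile)

-- ===== LEMMAS AND PROOFS =====

-- the flag value and the flag piece of one chunk
def pvFlag (c : List Char) : Char := if c.contains '5' then 'H' else 'M'
def pvPiece (c : List Char) : List Char := List.replicate c.length (pvFlag c)

-- flags of a string read in 3-chunks from the left (trailing <3 chars: none, only applied to multiples of 3)
def pvChunkFlags : List Char → List Char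
  | a :: b :: c :: rest => pvPiece [a, b, c] ++ pvChunkFlags rest
  | _ => []

theorem pvAttFor_eq_piece {c : List Char} (h : c.length = 3) : pvAttFor c = pvPiece c := by
  match c, h with
  | [a, b, x], _ =>
    by_cases ha : a = '5' <;> by_cases hb : b = '5' <;> by_cases hx : x = '5' <;>
      simp [pvAttFor, pvPiece, pvFlag, ha, hb, hx, List.replicate, eq_comm]

theorem pvChunkFlags_three {c : List Char} (h : c.length = 3) : pvChunkFlags c = pvPiece c := by
  match c, h with
  | [a, b, x], _ => simp [pvChunkFlags]

theorem pvChunkFlags_append : ∀ (X : List Char), X.length % 3 = 0 →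
    ∀ Y, pvChunkFlags (X ++ Y) = pvChunkFlags X ++ pvChunkFlags Y
  | [], _, Y => by simp [pvChunkFlags]
  | [a], h, Y => by simp at h
  | [a, b], h, Y => by simp at h
  | a :: b :: c :: rest, h, Y => by
      simp only [List.cons_append, pvChunkFlags, List.append_assoc]
      rw [pvChunkFlags_append rest (by simp at h; omega) Y]

-- A's padding loop prepends one '0' per range element
theorem pvFoldl_prepend (l : List Int) (pp : List Char) :
    l.foldl (fun acc _ => '0' :: acc) pp = List.replicate l.length '0' ++ pp := by
  induction l generalizing pp with
  | nil => simp
  | cons x xs ih => simp [List.foldl_cons, ih, List.replicate_succ']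

-- A's trimming loop drops one char per range element
theorem pvFoldl_tail (l : List Int) (acc : List Char) :
    l.foldl (fun a _ => a.tail) acc = acc.drop l.length := by
  induction l generalizing acc with
  | nil => simp
  | cons x xs ih => simp [List.foldl_cons, ih]


-- splitting a drop at a midpoint
theorem pvDrop_split (X : List Char) (r m : Nat) (hrm : r ≤ m) (hm : m ≤ X.length) :
    X.drop r = (X.take m).drop r ++ X.drop m := by
  conv_lhs => rw [← List.take_append_drop m X]
  rw [List.drop_append]
  simp [List.length_take, Nat.min_eq_left hm, Nat.sub_eq_zero_of_le hrm]

-- A's main loop computes chunk flags of the prefix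
theorem pvLoopA (m : Nat) (t : List Char) (h : 3 * m ≤ t.length) :
    (PySem.List.pyRange 0 (m : Int) 1).foldl
      (fun acc (i : Int) => acc ++ pvAttFor (PySem.List.slice t (some (i * 3)) (some (i * 3 + 3)))) []
    = pvChunkFlags (t.take (3 * m)) := by
  induction m with
  | zero => simp [PySem.List.pyRange_one_eq_nil, pvChunkFlags]
  | succ m ih =>
    have hcast : ((m + 1 : Nat) : Int) = (m : Int) + 1 := by push_cast; ring
    rw [hcast, PySem.List.pyRange_one_succ_right (by positivity), List.foldl_append,
      ih (by omega)]
    have hb : ((m : Int)) * 3 + 3 = ((3 * m + 3 : Nat) : Int) := by push_cast; ring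
    have ha : ((m : Int)) * 3 = ((3 * m : Nat) : Int) := by push_cast; ring
    simp only [List.foldl_cons, List.foldl_nil]
    rw [hb, ha, PySem.List.slice_natCast]
    have hchunk : (3 * m + 3) - 3 * m = 3 := by omega
    rw [hchunk]
    have hlen : ((t.drop (3 * m)).take 3).length = 3 := by
      simp [List.length_take, List.length_drop]; omega
    have htake : t.take (3 * (m + 1)) = t.take (3 * m) ++ (t.drop (3 * m)).take 3 := by
      have : 3 * (m + 1) = 3 * m + 3 := by omega
      rw [this, List.take_add]
    rw [htake, pvChunkFlags_append _ (by simp [List.length_take]; omega),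
      pvChunkFlags_three hlen, pvAttFor_eq_piece hlen]

-- B's recursion from position r + 3*k
theorem pvLoopB (s : List Char) (r k : Nat) (hr : r < 3)
    (h : r + 3 * k ≤ s.length) :
    ((pvPieces s (r + 3 * k)).reverse.flatten)
      = pvPiece (s.take r) ++ pvChunkFlags ((s.take (r + 3 * k)).drop r) := by
  induction k with
  | zero =>
    have hdr : (s.take r).drop r = [] := by
      apply List.drop_eq_nil_of_le; simp [List.length_take]
    have hmin : min r s.length = r := Nat.min_eq_left (by omega)
    rcases Nat.eq_zero_or_pos r with h0 | h0
    · subst h0; simp [pvPieces, pvPiece, pvChunkFlags]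
    · have e : r + 3 * 0 = r := by omega
      rw [e, pvPieces, dif_neg (by omega : ¬ r = 0),
        show r - 3 = 0 from by omega, pvPieces, dif_pos rfl]
      simp [hdr, pvChunkFlags, pvPiece, pvFlag, hmin]
  | succ k ih =>
    have hi : r + 3 * (k + 1) = (r + 3 * k) + 3 := by omega
    rw [hi, pvPieces]
    have hne : ¬ (r + 3 * k + 3 = 0) := by omega
    have hsub : r + 3 * k + 3 - 3 = r + 3 * k := by omega
    simp only [hne, dif_neg, not_false_iff, hsub]
    rw [List.reverse_cons, List.flatten_append, ih (by omega)]
    have hX : (s.take (r + 3 * k + 3)).take (r + 3 * k) = s.take (r + 3 * k) := by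
      rw [List.take_take]; congr 1; omega
    have hXlen : (s.take (r + 3 * k + 3)).length = r + 3 * k + 3 := by
      simp [List.length_take]; omega
    have hsplit : (s.take (r + 3 * k + 3)).drop r
        = (s.take (r + 3 * k)).drop r ++ (s.take (r + 3 * k + 3)).drop (r + 3 * k) := by
      rw [← hX]
      exact pvDrop_split _ r (r + 3 * k) (by omega) (by omega)
    have hclen : ((s.take (r + 3 * k + 3)).drop (r + 3 * k)).length = 3 := by
      simp [List.length_drop, hXlen]
    rw [hsplit, pvChunkFlags_append _ (by
        simp [List.length_drop, List.length_take]; omega),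
      pvChunkFlags_three hclen]
    simp [pvPiece, pvFlag, List.append_assoc]

-- a leading pad of '0's never changes the flag
theorem pvFlag_pad (k : Nat) (c : List Char) :
    pvFlag (List.replicate k '0' ++ c) = pvFlag c := by
  simp [pvFlag, List.mem_replicate]

-- common form: A's padded-then-trimmed flags
theorem pvCommon (s : List Char) :
    (pvChunkFlags (List.replicate (3 - s.length % 3) '0' ++ s)).drop (3 - s.length % 3)
      = pvPiece (s.take (s.length % 3)) ++ pvChunkFlags (s.drop (s.length % 3)) := by
  have hr : s.length % 3 < 3 := Nat.mod_lt _ (by omega)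
  have hrn : s.length % 3 ≤ s.length := Nat.mod_le _ _
  have hsplit : List.replicate (3 - s.length % 3) '0' ++ s
      = (List.replicate (3 - s.length % 3) '0' ++ s.take (s.length % 3)) ++ s.drop (s.length % 3) := by
    rw [List.append_assoc, List.take_append_drop]
  have hflen : (List.replicate (3 - s.length % 3) '0' ++ s.take (s.length % 3)).length = 3 := by
    simp [List.length_take]; omega
  rw [hsplit, pvChunkFlags_append _ (by rw [hflen]), pvChunkFlags_three hflen]
  simp only [pvPiece, hflen, pvFlag_pad]
  rw [List.drop_append, List.drop_replicate, List.length_replicate,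
    Nat.sub_eq_zero_of_le (by omega : 3 - s.length % 3 ≤ 3), List.drop_zero,
    show 3 - (3 - s.length % 3) = s.length % 3 from by omega]
  rw [List.length_take, Nat.min_eq_left hrn]

-- ===== VERDICT (by name: the statement is the Claim_ definition above) =====
theorem get_attention_sequence_spec : Claim_equal_get_attention_sequence := by
  intro pp _ hpre
  unfold Spec_get_attention_sequence get_attention_sequence get_attention_sequence_alt
  have hlt : 1 < pp.length := hpre
  have hg : PySem.List.pyGet? pp 1 = some (pp[1]'hlt) := by
    have h := PySem.List.pyGet?_ofNat pp 1 hlt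
    simpa using h
  rw [hg]
  dsimp only
  generalize (pp[1]'hlt).toList = s
  -- abbreviations
  have hr : s.length % 3 < 3 := Nat.mod_lt _ (by omega)
  -- A side
  rw [if_pos (by omega : ¬ (3 - s.length % 3 = 0)), pvFoldl_prepend,
    PySem.List.length_pyRange_one]
  have hot : (((3 - s.length % 3 : Nat) : Int) - 0).toNat = 3 - s.length % 3 := by omega
  rw [hot]
  have hplen : (List.replicate (3 - s.length % 3) '0' ++ s).length
      = (3 - s.length % 3) + s.length := by simp
  have hm3 : 3 * (((3 - s.length % 3) + s.length) / 3) = (3 - s.length % 3) + s.length := by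
    omega
  rw [hplen, pvLoopA _ _ (by rw [hplen]; omega)]
  rw [hm3, List.take_of_length_le (le_of_eq hplen)]
  simp only [PySem.List.slice_from_one]
  rw [pvFoldl_tail, PySem.List.length_pyRange_one, hot, pvCommon]
  -- B side
  have hB : (pvPieces s s.length).reverse.flatten
      = pvPiece (s.take (s.length % 3)) ++ pvChunkFlags (s.drop (s.length % 3)) := by
    have hn : s.length = s.length % 3 + 3 * (s.length / 3) := by omega
    rw [hn, pvLoopB s _ _ hr (by omega), ← hn, List.take_of_length_le (le_refl _)]
  rw [hB]
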